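-- pv_equiv track=rewrite | github.com/ArturCabman/PC_Urban_University | Module_2_itog.py | open_the_gate
-- ===== SOURCE A (Python) =====
-- def open_the_gate(number):
--     password = list()
--     digit = number + 1 // 2
--     for i in range(1, digit):
--         j = i + 1
--         while i + j <= number:
--             if number % (i + j) == 0:
--                 pass_numbers = str(i) + str(j)
--                 password.append(pass_numbers)
--             j += 1
--     return password
-- ===== SOURCE B (Python) =====
-- def open_the_gate(number):
--     # Precompute the divisors of `number` once, then pair each i with the
--     # divisors d > 2*i (j = d - i), instead of scanning all j for every i.
--     divs = [d for d in range(3, number + 1) if number % d == 0]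
--     return [str(i) + str(d - i)
--             for i in range(1, number)
--             for d in divs
--             if d > 2 * i]
-- ===== Notes on version B (the rewrite author's own statement) =====
-- stated objective: faster
-- what changed: B precomputes the divisor list of number once and, for each i, maps over the divisors greater than twice i (taking j as divisor minus i), replacing A's inner while-scan over every candidate j.
import Mathlib
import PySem

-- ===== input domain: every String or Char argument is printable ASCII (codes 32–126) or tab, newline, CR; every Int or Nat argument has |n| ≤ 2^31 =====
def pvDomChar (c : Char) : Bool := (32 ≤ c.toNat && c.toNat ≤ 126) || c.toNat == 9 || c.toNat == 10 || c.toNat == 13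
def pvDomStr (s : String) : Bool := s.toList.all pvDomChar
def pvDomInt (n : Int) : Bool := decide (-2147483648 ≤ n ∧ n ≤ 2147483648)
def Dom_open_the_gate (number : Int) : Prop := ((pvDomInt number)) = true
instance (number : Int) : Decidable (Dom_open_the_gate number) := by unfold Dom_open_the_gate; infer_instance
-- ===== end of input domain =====

-- B precomputes the divisor list once and pairs each i with divisors d > 2*i, replacing A's O(n^2) double scan.

-- ===== PORT A =====
-- inner while loop: 'while i + j <= number: if number % (i+j) == 0: append(str(i)+str(j)); j += 1'
def openTheGateInner (number i j : Int) : List String :=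
  if _h : i + j ≤ number then
    (if PySem.Int.mod number (i + j) == 0
     then [PySem.Int.toStr i ++ PySem.Int.toStr j] else [])
    ++ openTheGateInner number i (j + 1)
  else []
termination_by (number + 1 - (i + j)).toNat
decreasing_by simp_wf; omega

def open_the_gate (number : Int) : List String :=
  let digit := number + PySem.Int.floordiv 1 2
  (PySem.List.pyRange 1 digit 1).foldl
    (fun password i => password ++ openTheGateInner number i (i + 1)) []

-- ===== PORT B =====
-- divs = [d for d in range(3, number + 1) if number % d == 0]
def altDivs (number : Int) : List Int :=
  (PySem.List.pyRange 3 (number + 1) 1).filter (fun d => PySem.Int.mod number d == 0)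

def open_the_gate_alt (number : Int) : List String :=
  let divs := altDivs number
  (PySem.List.pyRange 1 number 1).flatMap (fun i =>
    (divs.filter (fun d => decide (2 * i < d))).map
      (fun d => PySem.Int.toStr i ++ PySem.Int.toStr (d - i)))

-- ===== PRECONDITION & SPEC =====
def Spec_open_the_gate (number : Int) (out : List String) : Prop := out = open_the_gate_alt number
instance (number : Int) (out : List String) : Decidable (Spec_open_the_gate number out) := by unfold Spec_open_the_gate; infer_instance

-- ===== CLAIM (what is proved, stated in full; the proofs are below) =====
def Claim_equal_open_the_gate : Prop := ∀ (number : Int), Dom_open_the_gate number → Spec_open_the_gate number (open_the_gate number)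

-- ===== LEMMAS AND PROOFS =====

-- A's inner while loop enumerates d = i+j over the range [i+j, number], keeping divisors.
theorem openTheGateInner_eq (number i j : Int) :
    openTheGateInner number i j =
      ((PySem.List.pyRange (i + j) (number + 1) 1).filter
          (fun d => PySem.Int.mod number d == 0)).map
        (fun d => PySem.Int.toStr i ++ PySem.Int.toStr (d - i)) := by
  generalize hn : (number + 1 - (i + j)).toNat = n
  induction n generalizing j with
  | zero =>
      rw [openTheGateInner, dif_neg (by omega : ¬ i + j ≤ number),
          PySem.List.pyRange_one_eq_nil (by omega : number + 1 ≤ i + j)]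
      simp
  | succ n ih =>
      have h : i + j ≤ number := by omega
      rw [openTheGateInner, dif_pos h,
          PySem.List.pyRange_one_cons (by omega : i + j < number + 1),
          List.filter_cons, ih (j + 1) (by omega)]
      by_cases hm : PySem.Int.mod number (i + j) == 0
      · simp [hm, add_assoc]
      · simp [hm, add_assoc]

-- filtering the precomputed divisor list to d > 2*i is filtering the tail range [2*i+1, number]
theorem altDivs_filter_eq (number i : Int) (hi : 1 ≤ i) :
    (altDivs number).filter (fun d => decide (2 * i < d)) =
      (PySem.List.pyRange (2 * i + 1) (number + 1) 1).filter
        (fun d => PySem.Int.mod number d == 0) := by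
  unfold altDivs
  rw [List.filter_filter]
  by_cases hcase : 2 * i + 1 ≤ number + 1
  · rw [PySem.List.pyRange_one_append 3 (2 * i + 1) (number + 1) (by omega) hcase,
        List.filter_append]
    have h1 : (PySem.List.pyRange 3 (2 * i + 1) 1).filter
        (fun d => decide (2 * i < d) && (PySem.Int.mod number d == 0)) = [] := by
      apply List.filter_eq_nil_iff.mpr
      intro d hd
      have := (PySem.List.mem_pyRange_one).mp hd
      simp only [Bool.and_eq_true, decide_eq_true_eq, not_and]
      intro _; omega
    have h2 : (PySem.List.pyRange (2 * i + 1) (number + 1) 1).filter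
        (fun d => decide (2 * i < d) && (PySem.Int.mod number d == 0)) =
        (PySem.List.pyRange (2 * i + 1) (number + 1) 1).filter
        (fun d => PySem.Int.mod number d == 0) := by
      apply List.filter_congr
      intro d hd
      have hmem := (PySem.List.mem_pyRange_one).mp hd
      have : decide (2 * i < d) = true := by simp; omega
      rw [this, Bool.true_and]
    rw [h1, h2, List.nil_append]
  · rw [PySem.List.pyRange_one_eq_nil (by omega : number + 1 ≤ 2 * i + 1)]
    simp only [List.filter_nil]
    apply List.filter_eq_nil_iff.mpr
    intro d hd
    have := (PySem.List.mem_pyRange_one).mp hd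
    simp only [Bool.and_eq_true, decide_eq_true_eq, not_and]
    intro _; omega

-- ===== VERDICT (by name: the statement is the Claim_ definition above) =====
theorem open_the_gate_spec : Claim_equal_open_the_gate := by
  intro number _
  unfold Spec_open_the_gate open_the_gate open_the_gate_alt
  have hfd : PySem.Int.floordiv 1 2 = 0 := by decide
  rw [hfd, add_zero, PySem.List.foldl_append_eq_flatMap, List.nil_append]
  apply List.flatMap_congr
  intro i hi
  have h1 : (1 : Int) ≤ i := ((PySem.List.mem_pyRange_one).mp hi).1
  rw [openTheGateInner_eq, altDivs_filter_eq number i h1]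
  have : i + (i + 1) = 2 * i + 1 := by ring
  rw [this]
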